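-- pv_equiv track=rewrite | github.com/hyr0ky/Blocksec-Skills | blocksec-chrome/utils/network_helper.py | parse_responses_by_path_mapping
-- ===== SOURCE A (Python) =====
-- from typing import Any, Dict, List, Optional, Callable
--
-- def parse_responses_by_path_mapping(
--
--     responses: Dict[str, Any],
--     path_mapping: Dict[str, str],
-- ) -> Dict[str, Any]:
--     """
--     根据路径映射解析响应
--
--     Args:
--         responses: API 响应字典 {url: response}
--         path_mapping: 路径映射 {name: path_fragment}
--
--     Returns:
--         解析后的响应字典 {name: response}
--     """
--     parsed = {}
--
--     for url, response in responses.items():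
--         for name, path in path_mapping.items():
--             if path in url:
--                 parsed[name] = response
--                 break
--
--     return parsed
-- ===== SOURCE B (Python) =====
-- def parse_responses_by_path_mapping(responses, path_mapping):
--     # Pattern-major: each mapping entry, in priority order, claims the
--     # still-unclaimed URLs whose text contains its path fragment.
--     owner = {}
--     unclaimed = list(responses)
--     for name, path in path_mapping.items():
--         if not unclaimed:
--             break
--         remaining = []
--         for url in unclaimed:
--             if path in url:
--                 owner[url] = name
--             else:
--                 remaining.append(url)
--         unclaimed = remaining
--     # Assemble the result in response order from the ownership table.
--     parsed = {}
--     for url, response in responses.items():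
--         if url in owner:
--             parsed[owner[url]] = response
--     return parsed
-- ===== Notes on version B (the rewrite author's own statement) =====
-- stated objective: alternative
-- what changed: A is URL-major (for each URL scan the mapping and insert at the first hit); B is pattern-major: each mapping entry, in priority order, claims the still-unclaimed URLs containing its path fragment, and the result is then assembled from the ownership table in response order.
import Mathlib
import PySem

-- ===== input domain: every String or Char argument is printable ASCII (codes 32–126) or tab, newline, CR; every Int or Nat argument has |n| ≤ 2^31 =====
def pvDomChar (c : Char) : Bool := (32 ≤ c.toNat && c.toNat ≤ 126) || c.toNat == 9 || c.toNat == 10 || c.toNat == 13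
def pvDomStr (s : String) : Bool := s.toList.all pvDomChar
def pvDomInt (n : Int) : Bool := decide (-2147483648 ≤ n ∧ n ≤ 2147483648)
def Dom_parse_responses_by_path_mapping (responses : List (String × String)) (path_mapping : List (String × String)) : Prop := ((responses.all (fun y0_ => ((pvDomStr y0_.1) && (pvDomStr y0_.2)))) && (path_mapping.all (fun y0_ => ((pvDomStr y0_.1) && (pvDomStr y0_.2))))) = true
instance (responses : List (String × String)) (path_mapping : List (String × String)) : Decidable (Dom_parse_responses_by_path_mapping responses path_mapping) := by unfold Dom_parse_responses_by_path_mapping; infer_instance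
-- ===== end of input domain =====

-- A is URL-major; B is pattern-major: each mapping entry in turn claims the still-unclaimed
-- URLs containing its path, then the result is assembled in response order (objective: alternative).

-- ===== PORT A =====
-- inner 'for name, path in path_mapping.items(): if path in url: parsed[name] = response; break'
def pvInnerA (parsed : PySem.Dict String String) (url resp : String) :
    List (String × String) → PySem.Dict String String
  | [] => parsed
  | (name, path) :: rest =>
    if PySem.Str.isIn path url then parsed.insert name resp
    else pvInnerA parsed url resp rest

def parse_responses_by_path_mapping (responses : List (String × String)) (path_mapping : List (String × String)) : List (String × String) :=
  (responses.foldl (fun parsed ur => pvInnerA parsed ur.1 ur.2 path_mapping)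
    PySem.Dict.empty).items

-- ===== PORT B =====
-- one claiming pass: 'for url in unclaimed: if path in url: owner[url] = name else: remaining.append(url)'
def pvClaim (name path : String) (st : PySem.Dict String String × List String) (url : String) :
    PySem.Dict String String × List String :=
  if PySem.Str.isIn path url then (st.1.insert url name, st.2)
  else (st.1, st.2 ++ [url])

def parse_responses_by_path_mapping_alt (responses : List (String × String)) (path_mapping : List (String × String)) : List (String × String) :=
  -- owner = {}; unclaimed = list(responses)
  -- for name, path in path_mapping.items():
  --   if not unclaimed: break
  --   remaining = []; <claiming pass>; unclaimed = remaining
  let st := path_mapping.foldl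
    (fun st np =>
      if st.2.isEmpty then st        -- 'break': nothing left to claim, state no longer changes
      else
        let r := st.2.foldl (pvClaim np.1 np.2) (st.1, [])
        (r.1, r.2))
    (PySem.Dict.empty, responses.map Prod.fst)
  -- for url, response in responses.items(): if url in owner: parsed[owner[url]] = response
  let parsed := responses.foldl
    (fun p ur => match st.1.get? ur.1 with
      | some n => p.insert n ur.2
      | none => p)
    PySem.Dict.empty
  parsed.items

-- ===== PRECONDITION & SPEC =====
def Spec_parse_responses_by_path_mapping (responses : List (String × String)) (path_mapping : List (String × String)) (out : List (String × String)) : Prop := out = parse_responses_by_path_mapping_alt responses path_mapping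
instance (responses : List (String × String)) (path_mapping : List (String × String)) (out : List (String × String)) : Decidable (Spec_parse_responses_by_path_mapping responses path_mapping out) := by unfold Spec_parse_responses_by_path_mapping; infer_instance

-- ===== CLAIM =====
def Claim_equal_parse_responses_by_path_mapping : Prop := ∀ (responses : List (String × String)) (path_mapping : List (String × String)), Dom_parse_responses_by_path_mapping responses path_mapping → Spec_parse_responses_by_path_mapping responses path_mapping (parse_responses_by_path_mapping responses path_mapping)

-- ===== LEMMAS AND PROOFS =====

-- 'first name in the mapping whose path occurs in url' (proof-side characterisation)
def pvFirstMatch (url : String) : List (String × String) → Option String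
  | [] => none
  | (name, path) :: rest =>
    if PySem.Str.isIn path url then some name else pvFirstMatch url rest

-- A's inner loop computes 'insert at the first match, if any'.
theorem pvInnerA_eq (d : PySem.Dict String String) (u r : String) (m : List (String × String)) :
    pvInnerA d u r m = match pvFirstMatch u m with
      | some n => d.insert n r
      | none => d := by
  induction m with
  | nil => rfl
  | cons p rest ih =>
    cases p with
    | mk name path =>
      simp only [pvInnerA, pvFirstMatch]
      by_cases h : PySem.Str.isIn path u = true
      · rw [if_pos h, if_pos h]
      · rw [if_neg h, if_neg h, ih]

-- the claiming pass: lookups in the owner component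
theorem claim_fst_get? (name path : String) (ul : List String)
    (o : PySem.Dict String String) (rem : List String) (k : String) :
    ((ul.foldl (pvClaim name path) (o, rem)).1).get? k =
      if k ∈ ul ∧ PySem.Str.isIn path k then some name else o.get? k := by
  induction ul generalizing o rem with
  | nil => simp
  | cons u ul ih =>
    rw [List.foldl_cons]
    by_cases hu : PySem.Chars.isIn path.toList u.toList = true
    · rw [show pvClaim name path (o, rem) u = (o.insert u name, rem) by
        simp [pvClaim, hu]]
      rw [ih]
      by_cases hk : k = u
      · subst hk; simp [hu, PySem.Dict.get?_insert]
      · by_cases hm : k ∈ ul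
        all_goals by_cases hik : PySem.Chars.isIn path.toList k.toList = true
        all_goals simp [hm, hik, hk, PySem.Dict.get?_insert]
    · rw [show pvClaim name path (o, rem) u = (o, rem ++ [u]) by
        simp [pvClaim, hu]]
      rw [ih]
      by_cases hk : k = u
      · subst hk; simp [hu]
      · simp [hk]

-- the claiming pass: the remaining component is the non-matching suffix
theorem claim_snd (name path : String) (ul : List String)
    (o : PySem.Dict String String) (rem : List String) :
    (ul.foldl (pvClaim name path) (o, rem)).2 =
      rem ++ ul.filter (fun u => !PySem.Str.isIn path u) := by
  induction ul generalizing o rem with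
  | nil => simp
  | cons u ul ih =>
    rw [List.foldl_cons]
    by_cases hu : PySem.Chars.isIn path.toList u.toList = true
    · rw [show pvClaim name path (o, rem) u = (o.insert u name, rem) by
        simp [pvClaim, hu]]
      simp [ih, hu]
    · rw [show pvClaim name path (o, rem) u = (o, rem ++ [u]) by
        simp [pvClaim, hu]]
      simp [ih, hu]

-- the whole ownership loop: first matching pattern per still-unclaimed URL
theorem owner_loop (pm : List (String × String)) (o : PySem.Dict String String)
    (ul : List String) (H : ∀ u ∈ ul, o.get? u = none) (k : String) :
    ((pm.foldl
      (fun st np =>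
        if st.2.isEmpty then st
        else
          let r := st.2.foldl (pvClaim np.1 np.2) (st.1, ([] : List String))
          (r.1, r.2))
      (o, ul)).1).get? k =
      (o.get? k).or (if k ∈ ul then pvFirstMatch k pm else none) := by
  induction pm generalizing o ul with
  | nil =>
    simp only [List.foldl_nil, pvFirstMatch]
    cases hm : decide (k ∈ ul) <;> simp_all
  | cons np pm ih =>
    cases np with
    | mk name path =>
      rw [List.foldl_cons]
      by_cases hemp : ul.isEmpty = true
      · have : ul = [] := List.isEmpty_iff.mp hemp
        subst this
        simp only [hemp, if_true]
        rw [ih o [] (by simp)]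
        simp
      · simp only [hemp, Bool.false_eq_true, if_false]
        rw [ih _ _ ?Hrem, claim_fst_get?, claim_snd]
        case Hrem =>
          intro u hu
          rw [claim_fst_get?, claim_snd] at *
          simp only [List.nil_append, List.mem_filter] at hu
          obtain ⟨hu1, hu2⟩ := hu
          rw [if_neg (by simp_all), H u hu1]
        simp only [List.nil_append, List.mem_filter, pvFirstMatch]
        by_cases hm : k ∈ ul
        · by_cases hik : PySem.Chars.isIn path.toList k.toList = true
          · rw [H k hm]; simp [hm, hik]
          · simp [hm, hik]
        · simp [hm]

-- ===== VERDICT =====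
theorem parse_responses_by_path_mapping_spec : Claim_equal_parse_responses_by_path_mapping := by
  intro responses path_mapping _hdom
  unfold Spec_parse_responses_by_path_mapping
  simp only [parse_responses_by_path_mapping, parse_responses_by_path_mapping_alt]
  congr 1
  apply PySem.List.foldl_congr_mem
  intro acc ur hur
  rw [pvInnerA_eq, owner_loop _ _ _ (fun u _ => PySem.Dict.get?_empty u)]
  have hk : ur.1 ∈ responses.map Prod.fst := List.mem_map_of_mem hur
  simp [hk]
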